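-- pv_equiv track=rewrite | github.com/Loganfreer/CS0-Loganfreer | Lectures/Assignments/Falling Apart/falling_apart.py | splitting_up
-- ===== SOURCE A (Python) =====
-- def splitting_up(sorted_list):
--     AliceSum = 0
--     BobSum = 0
--     AliceTurn = sorted_list[-1::-2]
--     BobTurn = sorted_list[-2::-2]
--     for i in AliceTurn:
--         AliceSum = AliceSum + i
--     for j in BobTurn:
--         BobSum = BobSum + j
--
--     return AliceSum, BobSum
-- ===== SOURCE B (Python) =====
-- def splitting_up(sorted_list):
--     alice_sum = 0
--     bob_sum = 0
--     alice_turn = True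
--     for v in reversed(sorted_list):
--         if alice_turn:
--             alice_sum += v
--         else:
--             bob_sum += v
--         alice_turn = not alice_turn
--     return alice_sum, bob_sum
-- ===== Notes on version B (the rewrite author's own statement) =====
-- stated objective: simpler
-- what changed: Replaces the two materialized extended slices sorted_list[-1::-2] and sorted_list[-2::-2] plus two summing loops with a single pass over reversed(sorted_list) that flips a boolean toggle, adding to Alice's total when the toggle is True and Bob's otherwise.
import Mathlib
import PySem

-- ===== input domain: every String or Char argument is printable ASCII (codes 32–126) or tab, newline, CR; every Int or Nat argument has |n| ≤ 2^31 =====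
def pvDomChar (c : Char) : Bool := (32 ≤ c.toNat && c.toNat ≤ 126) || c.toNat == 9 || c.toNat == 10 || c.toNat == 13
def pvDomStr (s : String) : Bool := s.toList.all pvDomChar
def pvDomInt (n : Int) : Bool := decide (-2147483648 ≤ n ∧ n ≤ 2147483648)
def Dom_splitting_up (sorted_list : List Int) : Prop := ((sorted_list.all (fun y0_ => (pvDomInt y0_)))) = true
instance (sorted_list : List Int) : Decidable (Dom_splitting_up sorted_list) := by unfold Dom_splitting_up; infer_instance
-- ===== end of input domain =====

-- B replaces the two extended-slice passes with one reversed pass and a boolean toggle (objective: simpler).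

-- ===== PORT A =====
-- slice? never returns none for step = -2, so .getD [] is exact here.
def splitting_up (sorted_list : List Int) : Int × Int :=
  let AliceTurn := (PySem.List.slice? sorted_list (some (-1)) none (-2)).getD []
  let BobTurn := (PySem.List.slice? sorted_list (some (-2)) none (-2)).getD []
  let AliceSum := AliceTurn.foldl (fun acc i => acc + i) 0
  let BobSum := BobTurn.foldl (fun acc j => acc + j) 0
  (AliceSum, BobSum)

-- ===== PORT B =====
def splitting_up_alt (sorted_list : List Int) : Int × Int :=
  let st := sorted_list.reverse.foldl
    (fun (st : Int × Int × Bool) v =>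
      if st.2.2 then (st.1 + v, st.2.1, false) else (st.1, st.2.1 + v, true))
    (0, 0, true)
  (st.1, st.2.1)

-- ===== PRECONDITION & SPEC =====
def Spec_splitting_up (sorted_list : List Int) (out : Int × Int) : Prop := out = splitting_up_alt sorted_list
instance (sorted_list : List Int) (out : Int × Int) : Decidable (Spec_splitting_up sorted_list out) := by unfold Spec_splitting_up; infer_instance

-- ===== CLAIM (what is proved, stated in full; the proofs are below) =====
def Claim_equal_splitting_up : Prop := ∀ (sorted_list : List Int), Dom_splitting_up sorted_list → Spec_splitting_up sorted_list (splitting_up sorted_list)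

-- ===== LEMMAS AND PROOFS =====

-- elements at even indices
def pvEvens {α : Type} : List α → List α
  | [] => []
  | [a] => [a]
  | a :: _ :: t => a :: pvEvens t

theorem pvEvens_cons {α : Type} (x : α) (t : List α) :
    pvEvens (x :: t) = x :: pvEvens t.tail := by
  cases t <;> simp [pvEvens]

theorem pvFilterMap_range_evens {α : Type} :
    ∀ (r : List α),
      List.filterMap (fun k => r[2 * k]?) (List.range ((r.length + 1) / 2)) = pvEvens r := by
  intro r
  induction r using pvEvens.induct with
  | case1 => simp [pvEvens]
  | case2 a => simp [pvEvens, List.range_succ]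
  | case3 a b t ih =>
    have hlen : (((a :: b :: t).length + 1) / 2) = ((t.length + 1) / 2) + 1 := by
      simp; omega
    rw [hlen, List.range_succ_eq_map, List.filterMap_cons, List.filterMap_map]
    simp only [Function.comp]
    have : (fun k => (a :: b :: t)[2 * Nat.succ k]?) = (fun k => t[2 * k]?) := by
      funext k
      have : 2 * Nat.succ k = (2 * k) + 2 := by omega
      simp [this, List.getElem?_cons_succ]
    rw [this, ih]
    simp [pvEvens]

theorem pvSliceAlice (xs : List Int) :
    PySem.List.slice? xs (some (-1)) none (-2) = some (pvEvens xs.reverse) := by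
  simp only [PySem.List.slice?, PySem.List.sliceIndices]
  norm_num
  have hc : (if 0 < xs.length then (((xs.length : Int) + 2 - 1) / 2).toNat else 0)
      = (xs.length + 1) / 2 := by split <;> omega
  rw [hc, ← pvFilterMap_range_evens xs.reverse, List.length_reverse]
  apply List.filterMap_congr
  intro k hk
  simp only [List.mem_range] at hk
  have h2 : 2 * k < xs.length := by omega
  rw [List.getElem?_reverse h2]
  congr 1
  omega

theorem pvSliceBob (xs : List Int) :
    PySem.List.slice? xs (some (-2)) none (-2) = some (pvEvens xs.reverse.tail) := by
  simp only [PySem.List.slice?, PySem.List.sliceIndices]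
  norm_num
  rcases Nat.lt_or_ge 1 xs.length with h | h
  · have hmax : max (-2 + (xs.length : Int)) (-1) = -2 + xs.length := by omega
    rw [hmax]
    have hc : (if 1 < xs.length then (((-2 + (xs.length : Int)) + 1 + 2 - 1) / 2).toNat else 0)
        = (xs.dropLast.reverse.length + 1) / 2 := by
      rw [if_pos h]; simp [List.length_dropLast]; omega
    rw [hc, ← pvFilterMap_range_evens xs.dropLast.reverse]
    apply List.filterMap_congr
    intro k hk
    simp only [List.mem_range, List.length_reverse, List.length_dropLast] at hk
    have h2 : 2 * k < xs.dropLast.length := by simp [List.length_dropLast]; omega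
    rw [List.getElem?_reverse h2]
    simp only [List.length_dropLast, List.getElem?_dropLast]
    rw [if_pos (by omega)]
    congr 1
    omega
  · rw [if_neg (by omega)]
    have hnil : xs.dropLast = [] := by
      apply List.eq_nil_of_length_eq_zero; simp [List.length_dropLast]; omega
    simp [hnil, pvEvens]

theorem pvFoldlAdd (l : List Int) (a : Int) :
    l.foldl (fun acc i => acc + i) a = a + l.sum := by
  induction l generalizing a with
  | nil => simp
  | cons x t ih => simp [ih, add_assoc]

theorem pvLoopChar :
    ∀ (r : List Int) (a b : Int),
      (∃ t, r.foldl (fun (st : Int × Int × Bool) v =>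
          if st.2.2 then (st.1 + v, st.2.1, false) else (st.1, st.2.1 + v, true)) (a, b, true)
        = (a + (pvEvens r).sum, b + (pvEvens r.tail).sum, t)) ∧
      (∃ t, r.foldl (fun (st : Int × Int × Bool) v =>
          if st.2.2 then (st.1 + v, st.2.1, false) else (st.1, st.2.1 + v, true)) (a, b, false)
        = (a + (pvEvens r.tail).sum, b + (pvEvens r).sum, t)) := by
  intro r
  induction r with
  | nil => intro a b; simp [pvEvens]
  | cons x t ih =>
    intro a b
    constructor
    · obtain ⟨tg, h⟩ := (ih (a + x) b).2
      exact ⟨tg, by simp [h, pvEvens_cons, add_assoc]⟩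
    · obtain ⟨tg, h⟩ := (ih a (b + x)).1
      exact ⟨tg, by simp [h, pvEvens_cons, add_assoc]⟩

-- ===== VERDICT (by name: the statement is the Claim_ definition above) =====
theorem splitting_up_spec : Claim_equal_splitting_up := by
  intro xs _
  unfold Spec_splitting_up splitting_up splitting_up_alt
  rw [pvSliceAlice, pvSliceBob]
  obtain ⟨tg, h⟩ := (pvLoopChar xs.reverse 0 0).1
  simp [h, pvFoldlAdd]
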